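-- pv_equiv track=rewrite | github.com/ntjohn04/kattis-solutions | textureanalysis.py | process
-- ===== SOURCE A (Python) =====
-- def process(arr):
--     spacings = set()
--     a = 0
--     for i in range(1, len(arr)):
--         if arr[i] == "*":
--             spacings.add(i-a)
--             a = i
--
--     if len(spacings) <= 1:
--         return "EVEN"
--     return "NOT EVEN"
-- ===== SOURCE B (Python) =====
-- def process(arr):
--     pos = [i for i in range(1, len(arr)) if arr[i] == "*"]
--     if not pos:
--         return "EVEN"
--     d = pos[0]
--     if all(p == (k + 1) * d for k, p in enumerate(pos)):
--         return "EVEN"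
--     return "NOT EVEN"
-- ===== Notes on version B (the rewrite author's own statement) =====
-- stated objective: alternative
-- what changed: B computes no gaps and keeps no set or running-previous accumulator: it builds the star positions (indices >= 1) and checks the closed-form arithmetic-progression property that the k-th star position equals (k+1)*d where d is the first star position.
import Mathlib
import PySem

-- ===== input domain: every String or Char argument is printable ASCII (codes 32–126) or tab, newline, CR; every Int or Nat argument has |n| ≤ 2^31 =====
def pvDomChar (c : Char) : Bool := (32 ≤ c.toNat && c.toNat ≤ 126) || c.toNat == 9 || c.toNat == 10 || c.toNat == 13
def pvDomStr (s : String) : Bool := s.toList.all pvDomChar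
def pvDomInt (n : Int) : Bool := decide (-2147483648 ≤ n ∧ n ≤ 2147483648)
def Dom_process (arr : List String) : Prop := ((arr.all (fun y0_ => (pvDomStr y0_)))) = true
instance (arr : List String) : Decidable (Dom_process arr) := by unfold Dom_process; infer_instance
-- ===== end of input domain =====

-- B drops A's gap-set/running-previous loop entirely: it lists the star positions (indices >= 1)
-- and checks the closed-form arithmetic-progression property pos[k] = (k+1)*pos[0]; objective: alternative.


-- ===== PORT A =====
-- arr[i] is always in range (i drawn from range(1,len(arr))), so pyGetD with a default is exact here
def process (arr : List String) : String :=
  let st := (PySem.List.pyRange 1 (arr.length : Int) 1).foldl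
    (fun (st : PySem.Set Int × Int) i =>
      if PySem.List.pyGetD arr i "" == "*" then (PySem.Set.add st.1 (i - st.2), i) else st)
    (PySem.Set.empty, 0)
  if PySem.Set.len st.1 ≤ 1 then "EVEN" else "NOT EVEN"

-- ===== PORT B =====
def process_alt (arr : List String) : String :=
  let pos := (PySem.List.pyRange 1 (arr.length : Int) 1).filter
    (fun i => PySem.List.pyGetD arr i "" == "*")
  match pos with
  | [] => "EVEN"
  | d :: _ =>
    if (PySem.List.enumerate pos 0).all (fun kp => kp.2 == (kp.1 + 1) * d) then "EVEN"
    else "NOT EVEN"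

-- ===== PRECONDITION & SPEC =====
def Spec_process (arr : List String) (out : String) : Prop := out = process_alt arr
instance (arr : List String) (out : String) : Decidable (Spec_process arr out) := by unfold Spec_process; infer_instance

-- ===== CLAIM (what is proved, stated in full; the proofs are below) =====
def Claim_equal_process : Prop := ∀ (arr : List String), Dom_process arr → Spec_process arr (process arr)

-- ===== LEMMAS AND PROOFS =====

-- A's loop over any index list, from any state (s, a), yields the set s updated with the
-- adjacent differences of (a :: filtered positions), paired with the last position (or a).
lemma process_loop_eq (pred : Int → Bool) (l : List Int) (s : PySem.Set Int) (a : Int) :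
    l.foldl
      (fun (st : PySem.Set Int × Int) i =>
        if pred i then (PySem.Set.add st.1 (i - st.2), i) else st)
      (s, a)
    = (PySem.Set.update s
        (List.zipWith (fun x y => y - x) (a :: l.filter pred) (l.filter pred)),
       (a :: l.filter pred).getLast (by simp)) := by
  induction l generalizing s a with
  | nil => simp [PySem.Set.update]
  | cons i l ih =>
      by_cases h : pred i
      · simp only [List.foldl_cons, List.filter_cons, h, if_pos]
        rw [ih]
        simp [PySem.Set.update]
      · simp only [List.foldl_cons, List.filter_cons, h, if_neg, Bool.false_eq_true,
          not_false_iff]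
        rw [ih]

-- set(x :: t) has at most one element iff every element of t equals x
lemma len_ofList_cons_le_one (x : Int) (t : List Int) :
    PySem.Set.len (PySem.Set.ofList (x :: t)) ≤ 1 ↔ ∀ y ∈ t, y = x := by
  rw [PySem.Set.ofList_cons]
  simp only [PySem.Set.len, List.length_cons]
  constructor
  · intro h y hy
    by_contra hne
    have hmem : y ∈ (PySem.Set.ofList t).discard x := by
      rw [PySem.Set.mem_discard, PySem.Set.mem_ofList]; exact ⟨hy, hne⟩
    have hlen : ((PySem.Set.ofList t).discard x).length ≠ 0 := by
      intro h0; rw [List.length_eq_zero_iff] at h0; simp [h0] at hmem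
    omega
  · intro h
    have hlen : ((PySem.Set.ofList t).discard x).length = 0 := by
      rw [List.length_eq_zero_iff, List.eq_nil_iff_forall_not_mem]
      intro y hy
      rw [PySem.Set.mem_discard, PySem.Set.mem_ofList] at hy
      exact hy.2 (h y hy.1)
    omega

-- "all adjacent differences of (a :: l) equal d" is the arithmetic-progression property
lemma diffs_const_iff (l : List Int) (a d : Int) :
    (∀ y ∈ List.zipWith (fun x y => y - x) (a :: l) l, y = d) ↔
      ∀ (k : Nat) (h : k < l.length), l[k] = a + ((k : Int) + 1) * d := by
  induction l generalizing a with
  | nil => simp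
  | cons b t ih =>
      simp only [List.zipWith_cons_cons, List.mem_cons, forall_eq_or_imp]
      rw [ih b]
      constructor
      · rintro ⟨h0, hrest⟩ k hk
        cases k with
        | zero => simp; omega
        | succ j =>
            have := hrest j (by simpa using hk)
            simp only [List.getElem_cons_succ]
            push_cast
            rw [this]
            have hb : b = a + d := by omega
            rw [hb]; ring
      · intro h
        have h0 := h 0 (by simp)
        simp at h0
        refine ⟨by omega, ?_⟩
        intro j hj
        have := h (j + 1) (by simpa using Nat.succ_lt_succ hj)
        simp only [List.getElem_cons_succ] at this
        push_cast at this
        rw [this]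
        have hb : b = a + d := by omega
        rw [hb]; ring

-- B's enumerate-all check is the same indexed property
lemma enum_all_iff (l : List Int) (s d : Int) :
    ((PySem.List.enumerate l s).all (fun kp => kp.2 == (kp.1 + 1) * d) = true) ↔
      ∀ (k : Nat) (h : k < l.length), l[k] = (s + (k : Int) + 1) * d := by
  induction l generalizing s with
  | nil => simp [PySem.List.enumerate_nil]
  | cons b t ih =>
      rw [PySem.List.enumerate_cons]
      simp only [List.all_cons, Bool.and_eq_true, beq_iff_eq]
      rw [ih (s + 1)]
      constructor
      · rintro ⟨h0, hrest⟩ k hk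
        cases k with
        | zero => simpa using h0
        | succ j =>
            have := hrest j (by simpa using hk)
            simp only [List.getElem_cons_succ]
            push_cast
            rw [this]; ring
      · intro h
        refine ⟨by simpa using h 0 (by simp), ?_⟩
        intro j hj
        have := h (j + 1) (by simpa using Nat.succ_lt_succ hj)
        simp only [List.getElem_cons_succ] at this
        push_cast at this
        rw [this]; ring

-- ===== VERDICT (by name: the statement is the Claim_ definition above) =====
theorem process_spec : Claim_equal_process := by
  intro arr _
  unfold Spec_process process process_alt
  rw [process_loop_eq]
  simp only
  cases hpos : (PySem.List.pyRange 1 (arr.length : Int) 1).filter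
      (fun i => PySem.List.pyGetD arr i "" == "*") with
  | nil => simp [PySem.Set.update, PySem.Set.len]
  | cons d rest =>
      have hupd : PySem.Set.update PySem.Set.empty
          (List.zipWith (fun x y => y - x) (0 :: d :: rest) (d :: rest))
          = PySem.Set.ofList (List.zipWith (fun x y => y - x) (0 :: d :: rest) (d :: rest)) := rfl
      rw [hupd]
      simp only [List.zipWith_cons_cons]
      have h1 := len_ofList_cons_le_one (d - 0) (List.zipWith (fun x y => y - x) (d :: rest) rest)
      have h2 := diffs_const_iff rest d (d - 0)
      have h3 := enum_all_iff (d :: rest) 0 d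
      by_cases hc : PySem.Set.len (PySem.Set.ofList
          ((d - 0) :: List.zipWith (fun x y => y - x) (d :: rest) rest)) ≤ 1
      · rw [if_pos hc]
        have hap := (h2.mp (h1.mp hc))
        have : ((PySem.List.enumerate (d :: rest) 0).all
            (fun kp => kp.2 == (kp.1 + 1) * d) = true) := by
          rw [h3]
          intro k hk
          cases k with
          | zero => simp
          | succ j =>
              have := hap j (by simpa using hk)
              simp only [List.getElem_cons_succ]
              rw [this]
              push_cast; ring
        rw [if_pos this]
      · rw [if_neg hc]
        have : ¬ ((PySem.List.enumerate (d :: rest) 0).all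
            (fun kp => kp.2 == (kp.1 + 1) * d) = true) := by
          intro hall
          apply hc
          rw [h1]
          apply h2.mpr
          intro k hk
          have := (h3.mp hall) (k + 1) (by simpa using Nat.succ_lt_succ hk)
          simp only [List.getElem_cons_succ] at this
          rw [this]
          push_cast; ring
        rw [if_neg this]
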